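-- pv_equiv track=rewrite | github.com/mattjhussey/pemjh | src/pemjh/challenge179/main.py | working
-- ===== SOURCE A (Python) =====
-- def working(limit):
--     # Make array for all numbers
--     arr = [0] * (limit + 1)
--
--     nSame = 0
--     prev = 0
--     for i in range(1, limit + 1):
--         for a in range(i, limit + 1, i):
--             arr[a] += 1
--
--         curr = arr[i]
--         if curr == prev:
--             nSame += 1
--
--         prev = curr
--
--     return nSame
-- ===== SOURCE B (Python) =====
-- def working(limit):
--     # Smallest-prime-factor sieve, then divisor counts via factorization.
--     spf = list(range(limit + 1))
--     p = 2
--     while p * p <= limit: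
--         if spf[p] == p:
--             for m in range(p * p, limit + 1, p):
--                 if spf[m] == m:
--                     spf[m] = p
--         p += 1
--
--     nSame = 0
--     prev = 0
--     for i in range(1, limit + 1):
--         n = i
--         d = 1
--         while n > 1:
--             q = spf[n]
--             e = 0
--             while n % q == 0:
--                 n //= q
--                 e += 1
--             d *= e + 1
--         curr = d
--         if curr == prev:
--             nSame += 1
--         prev = curr
--     return nSame
-- ===== Notes on version B (the rewrite author's own statement) =====
-- stated objective: alternative
-- what changed: A fills a divisor-count table by incrementing every multiple of every i (harmonic sieve); B builds a smallest-prime-factor sieve and computes each number's divisor count by factorizing it via that table, multiplying together (exponent plus one) over its prime factors, then does the same consecutive-equal comparison pass.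
import Mathlib
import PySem

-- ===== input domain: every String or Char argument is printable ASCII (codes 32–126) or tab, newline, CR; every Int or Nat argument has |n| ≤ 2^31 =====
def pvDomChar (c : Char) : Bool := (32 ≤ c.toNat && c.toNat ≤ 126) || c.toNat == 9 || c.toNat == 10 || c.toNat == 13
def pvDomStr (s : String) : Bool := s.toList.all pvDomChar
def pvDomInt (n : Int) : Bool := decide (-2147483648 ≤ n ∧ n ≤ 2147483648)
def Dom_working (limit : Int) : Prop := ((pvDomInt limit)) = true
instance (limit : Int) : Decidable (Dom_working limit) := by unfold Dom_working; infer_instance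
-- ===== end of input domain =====

-- B replaces A's harmonic add-to-all-multiples divisor sieve by a smallest-prime-factor
-- sieve plus per-number factorization (alternative algorithm, similar cost).

-- ===== PORT A =====
-- In A every index used on arr is in range (1 ≤ a ≤ limit < len arr), so the total
-- pyGetD/pySetD forms are exact here.
def workingInner (limit i : Int) (arr : List Int) : List Int :=
  (PySem.List.pyRange i (limit + 1) i).foldl
    (fun s a => PySem.List.pySetD s a (PySem.List.pyGetD s a 0 + 1)) arr

def workingStep (limit : Int) (st : List Int × Int × Int) (i : Int) : List Int × Int × Int :=
  let arr := workingInner limit i st.1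
  let curr := PySem.List.pyGetD arr i 0
  (arr, (if curr = st.2.2 then st.2.1 + 1 else st.2.1), curr)

def working (limit : Int) : Int :=
  -- [0] * (limit + 1): a negative repeat count yields the empty list, hence .toNat
  let arr := List.replicate (limit + 1).toNat (0 : Int)
  (((PySem.List.pyRange 1 (limit + 1) 1).foldl (workingStep limit) (arr, 0, 0)).2).1

-- ===== PORT B =====
-- The three while-loops of Source B become structural recursions; the extra conditions
-- marked "totality guard" only make the recursion well-founded (they always hold when
-- the loop in Source B terminates) and are exact on every input B is run on.

-- inner `for m in range(p*p, limit+1, p): if spf[m] == m: spf[m] = p`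
def spfMark (limit p : Int) (spf : List Int) : List Int :=
  (PySem.List.pyRange (p * p) (limit + 1) p).foldl
    (fun s m => if PySem.List.pyGetD s m 0 = m then PySem.List.pySetD s m p else s) spf

-- `while p * p <= limit: … p += 1`
def spfSieve (limit p : Int) (spf : List Int) : List Int :=
  if h : p * p ≤ limit then
    spfSieve limit (p + 1)
      (if PySem.List.pyGetD spf p 0 = p then spfMark limit p spf else spf)
  else spf
termination_by (limit + 2 - p).toNat
decreasing_by
  have h0 : 0 ≤ limit := le_trans (mul_self_nonneg p) h
  have h1 : 2 * p - 1 ≤ limit := by nlinarith [sq_nonneg (p - 1)]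
  omega

-- `e = 0; while n % q == 0: n //= q; e += 1`  (returns (e, final n));
-- `2 ≤ q ∧ 1 ≤ n` is a totality guard
def divOut (q n : Int) : Int × Int :=
  if h : 2 ≤ q ∧ 1 ≤ n ∧ PySem.Int.mod n q = 0 then
    let r := divOut q (PySem.Int.floordiv n q)
    (r.1 + 1, r.2)
  else (0, n)
termination_by n.toNat
decreasing_by
  rw [PySem.Int.floordiv_eq_ediv_of_pos (by omega)]
  have h1 : n / q < n := Int.ediv_lt_of_lt_mul (by omega) (by nlinarith)
  omega

-- `while n > 1: q = spf[n]; …divide out…; d *= e + 1`; the `if _h2` test is a totality guard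
def dLoop (spf : List Int) (n d : Int) : Int :=
  if _h : 1 < n then
    match divOut (PySem.List.pyGetD spf n 0) n with
    | (e, n') => if _h2 : 0 ≤ n' ∧ n' < n then dLoop spf n' (d * (e + 1)) else d * (e + 1)
  else d
termination_by n.toNat
decreasing_by omega

def working_alt (limit : Int) : Int :=
  let spf := spfSieve limit 2 (PySem.List.pyRange 0 (limit + 1) 1)
  ((PySem.List.pyRange 1 (limit + 1) 1).foldl
    (fun st i =>
      let curr := dLoop spf i 1
      ((if curr = st.2 then st.1 + 1 else st.1), curr))
    (0, 0)).1

-- ===== PRECONDITION & SPEC =====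
def Spec_working (limit : Int) (out : Int) : Prop := out = working_alt limit
instance (limit : Int) (out : Int) : Decidable (Spec_working limit out) := by unfold Spec_working; infer_instance

-- ===== CLAIM (what is proved, stated in full; the proofs are below) =====
def Claim_equal_working : Prop := ∀ (limit : Int), Dom_working limit → Spec_working limit (working limit)

-- ===== LEMMAS AND PROOFS =====

-- reference divisor-count function both sides are proved equal to
def dRef (i : Int) : Int := (i.toNat.divisors.card : Int)

def refStep (st : Int × Int) (i : Int) : Int × Int :=
  ((if dRef i = st.2 then st.1 + 1 else st.1), dRef i)

-- number of j ∈ {1,…,k} with j ∣ m ∧ j ≤ m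
def cntTo (k m : Int) : Int :=
  ((PySem.List.pyRange 1 (k + 1) 1).countP (fun j => decide (j ∣ m ∧ j ≤ m)) : Int)

def arrF (limit k : Int) : List Int :=
  (List.range (limit + 1).toNat).map (fun (m : Nat) => cntTo k (m : Int))

theorem nodup_pyRange_pos (a b s : Int) (hs : 0 < s) : (PySem.List.pyRange a b s).Nodup := by
  rw [PySem.List.pyRange_of_pos a b hs]
  refine List.Nodup.map ?_ (List.nodup_range)
  intro k1 k2 h
  have h' : s * (k1:Int) = s * k2 := by linarith
  have := mul_left_cancel₀ (by omega : s ≠ 0) h'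
  exact_mod_cast this

theorem incr_fold (L : List Int) (hN : L.Nodup) : ∀ (arr : List Int),
    (∀ x ∈ L, 0 ≤ x ∧ x.toNat < arr.length) →
    ((L.foldl (fun s a => PySem.List.pySetD s a (PySem.List.pyGetD s a 0 + 1)) arr).length = arr.length
    ∧ ∀ m : Nat, m < arr.length →
        (L.foldl (fun s a => PySem.List.pySetD s a (PySem.List.pyGetD s a 0 + 1)) arr).getD m 0
          = arr.getD m 0 + (if (m:Int) ∈ L then 1 else 0)) := by
  induction L with
  | nil => intro arr _; simp
  | cons x L ih =>
    intro arr hR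
    obtain ⟨hx0, hxlt⟩ := hR x (by simp)
    obtain ⟨xn, rfl⟩ : ∃ xn : Nat, x = (xn : Int) := ⟨x.toNat, by omega⟩
    rw [Int.toNat_natCast] at hxlt
    set s1 := PySem.List.pySetD arr (xn:Int) (PySem.List.pyGetD arr (xn:Int) 0 + 1) with hs1
    have hlen1 : s1.length = arr.length := by
      rw [hs1, PySem.List.pySetD_natCast]; simp
    have hR' : ∀ y ∈ L, 0 ≤ y ∧ y.toNat < s1.length := by
      intro y hy; rw [hlen1]; exact hR y (by simp [hy])
    obtain ⟨ihlen, ihget⟩ := ih (List.nodup_cons.mp hN).2 _ hR'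
    refine ⟨?_, ?_⟩
    · rw [List.foldl_cons]
      show (List.foldl _ s1 L).length = _
      rw [ihlen, hlen1]
    intro m hm
    have hm' : m < s1.length := by omega
    have hstep : s1.getD m 0 = if m = xn then arr.getD xn 0 + 1 else arr.getD m 0 := by
      rw [hs1]
      have := PySem.List.pyGetD_pySetD_natCast arr xn m (PySem.List.pyGetD arr (xn:Int) 0 + 1) 0 hxlt
      simpa [PySem.List.pyGetD_natCast] using this
    rw [List.foldl_cons]
    show (List.foldl _ s1 L).getD m 0 = _
    rw [ihget m hm', hstep]
    by_cases hmx : m = xn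
    · have hnot : ((m:Nat):Int) ∉ L := by
        subst hmx; exact (List.nodup_cons.mp hN).1
      subst hmx; simp [hnot]
    · have hxm : ¬ ((m:Int) = (xn:Int)) := by exact_mod_cast hmx
      simp [hmx, hxm, List.mem_cons]

theorem mark_fold (p : Int) (L : List Int) (hN : L.Nodup) : ∀ (arr : List Int),
    (∀ x ∈ L, 0 ≤ x ∧ x.toNat < arr.length) →
    ((L.foldl (fun s m => if PySem.List.pyGetD s m 0 = m then PySem.List.pySetD s m p else s) arr).length = arr.length
    ∧ ∀ m : Nat, m < arr.length →
        (L.foldl (fun s m => if PySem.List.pyGetD s m 0 = m then PySem.List.pySetD s m p else s) arr).getD m 0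
          = if ((m:Int) ∈ L ∧ arr.getD m 0 = (m:Int)) then p else arr.getD m 0) := by
  induction L with
  | nil => intro arr _; simp
  | cons x L ih =>
    intro arr hR
    obtain ⟨hx0, hxlt⟩ := hR x (by simp)
    obtain ⟨xn, rfl⟩ : ∃ xn : Nat, x = (xn : Int) := ⟨x.toNat, by omega⟩
    rw [Int.toNat_natCast] at hxlt
    set s1 := if PySem.List.pyGetD arr (xn:Int) 0 = (xn:Int) then PySem.List.pySetD arr (xn:Int) p else arr with hs1
    have hlen1 : s1.length = arr.length := by
      rw [hs1]; split
      · rw [PySem.List.pySetD_natCast]; simp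
      · rfl
    have hR' : ∀ y ∈ L, 0 ≤ y ∧ y.toNat < s1.length := by
      intro y hy; rw [hlen1]; exact hR y (by simp [hy])
    obtain ⟨ihlen, ihget⟩ := ih (List.nodup_cons.mp hN).2 _ hR'
    have hget1 : ∀ m : Nat, m < arr.length →
        s1.getD m 0 = if (m = xn ∧ arr.getD m 0 = (m:Int)) then p else arr.getD m 0 := by
      intro m hm
      rw [hs1]
      by_cases hc : PySem.List.pyGetD arr (xn:Int) 0 = (xn:Int)
      · rw [if_pos hc]
        have := PySem.List.pyGetD_pySetD_natCast arr xn m p 0 hxlt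
        simp only [PySem.List.pyGetD_natCast] at this hc
        rw [this]
        by_cases hmx : m = xn
        · subst hmx; simp only [List.getD] at hc; simp [hc]
        · simp [hmx]
      · rw [if_neg hc]
        simp only [PySem.List.pyGetD_natCast, List.getD] at hc
        by_cases hmx : m = xn
        · subst hmx; simp [hc]
        · simp [hmx]
    refine ⟨?_, ?_⟩
    · rw [List.foldl_cons]
      show (List.foldl _ s1 L).length = _
      rw [ihlen, hlen1]
    intro m hm
    have hm' : m < s1.length := by omega
    rw [List.foldl_cons]
    show (List.foldl _ s1 L).getD m 0 = _
    rw [ihget m hm', hget1 m hm]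
    by_cases hmx : m = xn
    · have hnot : ((m:Nat):Int) ∉ L := by subst hmx; exact (List.nodup_cons.mp hN).1
      subst hmx
      by_cases ha : arr.getD m 0 = ((m:Nat):Int) <;> simp [hnot]
    · have hxm : ¬ ((m:Int) = (xn:Int)) := by exact_mod_cast hmx
      by_cases hmL : ((m:Nat):Int) ∈ L <;> by_cases ha : arr.getD m 0 = ((m:Nat):Int) <;>
        simp [hmx, hxm, hmL, List.mem_cons]

def SpfInv (limit p : Int) (spf : List Int) : Prop :=
  spf.length = (limit + 1).toNat ∧
  ∀ m : Nat, m < spf.length →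
    spf.getD m 0 = if 2 ≤ m ∧ (m.minFac : Int) < p ∧ m.minFac ≠ m then (m.minFac : Int) else (m : Int)

def SpfGood (limit : Int) (spf : List Int) : Prop :=
  spf.length = (limit + 1).toNat ∧
  ∀ m : Nat, m < spf.length → spf.getD m 0 = if 2 ≤ m then (m.minFac : Int) else (m : Int)

theorem spf_init (limit : Int) : SpfInv limit 2 (PySem.List.pyRange 0 (limit + 1) 1) := by
  constructor
  · rw [PySem.List.length_pyRange_one]; omega
  · intro m hm
    rw [PySem.List.length_pyRange_one] at hm
    have hlen' : m < (PySem.List.pyRange 0 (limit + 1) 1).length := by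
      rw [PySem.List.length_pyRange_one]; omega
    have hget : (PySem.List.pyRange 0 (limit + 1) 1).getD m 0 = (m : Int) := by
      rw [List.getD_eq_getElem?_getD, List.getElem?_eq_getElem hlen',
        PySem.List.getElem_pyRange_one]
      simp
    rw [hget]
    by_cases hm2 : 2 ≤ m
    · have hpf : m.minFac.Prime := Nat.minFac_prime (by omega)
      have : (2:Nat) ≤ m.minFac := hpf.two_le
      have : ¬ ((m.minFac : Int) < 2) := by exact_mod_cast not_lt.mpr this
      simp [this]
    · simp [hm2]

theorem mem_mark_range (p limit : Int) (hp : 2 ≤ p) (m : Nat) :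
    ((m:Int) ∈ PySem.List.pyRange (p*p) (limit+1) p) ↔ (p*p ≤ (m:Int) ∧ (m:Int) ≤ limit ∧ p ∣ (m:Int)) := by
  rw [PySem.List.mem_pyRange_iff_of_pos (by omega)]
  constructor
  · rintro ⟨h1, h2, h3⟩
    refine ⟨h1, by omega, ?_⟩
    have := dvd_add h3 (dvd_mul_left p p)
    simpa using this
  · rintro ⟨h1, h2, h3⟩
    exact ⟨h1, by omega, dvd_sub h3 (dvd_mul_left p p)⟩

theorem spf_step (limit p : Int) (spf : List Int) (hp : 2 ≤ p) (hpl : p * p ≤ limit)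
    (hInv : SpfInv limit p spf) :
    SpfInv limit (p+1) (if PySem.List.pyGetD spf p 0 = p then spfMark limit p spf else spf) := by
  obtain ⟨hlen, hget⟩ := hInv
  have hlim0 : 0 ≤ limit := le_trans (mul_self_nonneg p) hpl
  have hplim : p ≤ limit := by nlinarith
  obtain ⟨pp, rfl⟩ : ∃ pp : Nat, p = (pp : Int) := ⟨p.toNat, by omega⟩
  have hpp2 : 2 ≤ pp := by exact_mod_cast hp
  have hpplen : pp < spf.length := by rw [hlen]; omega
  have htest : (PySem.List.pyGetD spf (pp:Int) 0 = (pp:Int)) ↔ pp.Prime := by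
    rw [PySem.List.pyGetD_natCast, hget pp hpplen]
    by_cases hc : 2 ≤ pp ∧ ((pp.minFac : Int) < (pp:Int) ∧ pp.minFac ≠ pp)
    · rw [if_pos hc]
      constructor
      · intro h; exact absurd (by exact_mod_cast h) hc.2.2
      · intro h; exact absurd (Nat.prime_def_minFac.mp h).2 hc.2.2
    · rw [if_neg hc]
      refine ⟨fun _ => ?_, fun _ => rfl⟩
      rw [Nat.prime_def_minFac]
      refine ⟨hpp2, ?_⟩
      rcases not_and_or.mp hc with h | h
      · omega
      · rcases not_and_or.mp h with h' | h'
        · have h1 : pp.minFac ≤ pp := Nat.minFac_le (by omega)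
          have h2 : (pp:Int) ≤ (pp.minFac : Int) := by exact_mod_cast not_lt.mp h'
          have : pp ≤ pp.minFac := by exact_mod_cast h2
          omega
        · omega
  split
  case isTrue hc =>
    have hprime : pp.Prime := htest.mp hc
    -- characterize the marking fold
    have hL : ∀ x ∈ PySem.List.pyRange ((pp:Int)*(pp:Int)) (limit+1) (pp:Int), 0 ≤ x ∧ x.toNat < spf.length := by
      intro x hx
      rw [PySem.List.mem_pyRange_iff_of_pos (by omega)] at hx
      have : 0 ≤ x := by nlinarith [hx.1]
      refine ⟨this, ?_⟩
      rw [hlen]; omega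
    obtain ⟨hmlen, hmget⟩ := mark_fold (pp:Int) _ (nodup_pyRange_pos _ _ _ (by omega)) spf hL
    refine ⟨by rw [spfMark, hmlen, hlen], ?_⟩
    intro m hm
    rw [spfMark] at hm ⊢
    rw [hmlen] at hm
    rw [hmget m hm]
    have hmi : (m:Int) ≤ limit := by rw [hlen] at hm; omega
    have hOLD := hget m hm
    have hmem := mem_mark_range (pp:Int) limit hp m
    have h4 : (4:Int) ≤ (pp:Int)*(pp:Int) := by
      have h2 : (2:Int) ≤ (pp:Int) := hp
      nlinarith
    by_cases hm2 : 2 ≤ m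
    · by_cases hfac : m.minFac = m
      · -- minimal factor is m itself (m prime): never marked, stays m
        have hOLD' : spf.getD m 0 = (m:Int) := by rw [hOLD, if_neg (fun h => h.2.2 hfac)]
        have hnm : ¬ ((m:Int) ∈ PySem.List.pyRange ((pp:Int)*(pp:Int)) (limit+1) (pp:Int)) := by
          rw [hmem]; rintro ⟨h1, _, h3⟩
          have hdvd : pp ∣ m := by exact_mod_cast h3
          have hle : m.minFac ≤ pp := Nat.minFac_le_of_dvd hpp2 hdvd
          have hppm : pp * pp ≤ m := by exact_mod_cast h1
          nlinarith [hfac.symm.trans_le hle]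
        rw [hOLD', if_neg (fun h => hnm h.1), if_neg (fun h => h.2.2 hfac)]
      · by_cases hlt : (m.minFac : Int) < (pp:Int)
        · -- already marked by a smaller prime
          have hOLD' : spf.getD m 0 = (m.minFac : Int) := by rw [hOLD, if_pos ⟨hm2, hlt, hfac⟩]
          have hne : (m.minFac : Int) ≠ (m:Int) := fun h => hfac (by exact_mod_cast h)
          rw [hOLD', if_neg (fun h => hne h.2), if_pos ⟨hm2, by omega, hfac⟩]
        · by_cases heq : m.minFac = pp
          · -- gets marked in this round
            have hOLD' : spf.getD m 0 = (m:Int) := by rw [hOLD, if_neg (fun h => hlt h.2.1)]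
            have hdvdN : pp ∣ m := heq ▸ Nat.minFac_dvd m
            obtain ⟨r, hr⟩ := hdvdN
            have hr1 : r ≠ 1 := by
              intro h1; rw [h1, Nat.mul_one] at hr; exact hfac (by omega)
            have hr0 : r ≠ 0 := by
              intro h0; rw [h0, Nat.mul_zero] at hr; omega
            have hrmin : pp ≤ r.minFac := by
              have hd : r.minFac ∣ m := by
                rw [hr]; exact Dvd.dvd.mul_left (Nat.minFac_dvd r) pp
              have := Nat.minFac_le_of_dvd (Nat.minFac_prime hr1).two_le hd
              omega
            have hrge : pp ≤ r := le_trans hrmin (Nat.minFac_le (by omega))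
            have hsqN : pp * pp ≤ m := by
              rw [hr]; exact Nat.mul_le_mul le_rfl hrge
            have hm_mem : (m:Int) ∈ PySem.List.pyRange ((pp:Int)*(pp:Int)) (limit+1) (pp:Int) := by
              rw [hmem]
              exact ⟨by exact_mod_cast hsqN, hmi, by exact_mod_cast (heq ▸ Nat.minFac_dvd m)⟩
            rw [hOLD', if_pos ⟨hm_mem, rfl⟩, if_pos ⟨hm2, by rw [heq]; omega, hfac⟩, heq]
          · -- smallest factor bigger than p: untouched and still unmarked
            have hgt : (pp:Int) < (m.minFac : Int) := by
              have hne : (m.minFac : Int) ≠ (pp:Int) := fun h => heq (by exact_mod_cast h)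
              omega
            have hOLD' : spf.getD m 0 = (m:Int) := by rw [hOLD, if_neg (fun h => hlt h.2.1)]
            have hnm : ¬ ((m:Int) ∈ PySem.List.pyRange ((pp:Int)*(pp:Int)) (limit+1) (pp:Int)) := by
              rw [hmem]; rintro ⟨_, _, h3⟩
              have : m.minFac ≤ pp := Nat.minFac_le_of_dvd hpp2 (by exact_mod_cast h3)
              have : (m.minFac : Int) ≤ (pp:Int) := by exact_mod_cast this
              omega
            rw [hOLD', if_neg (fun h => hnm h.1), if_neg (fun h => by
              have := h.2.1; omega)]
    · -- m ≤ 1 : untouched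
      have hOLD' : spf.getD m 0 = (m:Int) := by rw [hOLD, if_neg (by omega)]
      have hnm : ¬ ((m:Int) ∈ PySem.List.pyRange ((pp:Int)*(pp:Int)) (limit+1) (pp:Int)) := by
        rw [hmem]; rintro ⟨h1, _, _⟩; omega
      rw [hOLD', if_neg (fun h => hnm h.1), if_neg (by omega)]
  case isFalse hc =>
    have hnprime : ¬ pp.Prime := fun h => hc (htest.mpr h)
    refine ⟨hlen, ?_⟩
    intro m hm
    rw [hget m hm]
    by_cases hcnd : 2 ≤ m ∧ ((m.minFac : Int) < (pp:Int) ∧ m.minFac ≠ m)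
    · rw [if_pos hcnd, if_pos ⟨hcnd.1, by omega, hcnd.2.2⟩]
    · rw [if_neg hcnd]
      rw [if_neg ?_]
      intro h
      apply hcnd
      refine ⟨h.1, ?_, h.2.2⟩
      have h1 : (m.minFac : Int) < (pp:Int) + 1 := h.2.1
      have hne : (m.minFac : Int) ≠ (pp:Int) := by
        intro he
        have : m.minFac = pp := by exact_mod_cast he
        exact hnprime (this ▸ Nat.minFac_prime (by omega))
      omega

theorem spf_exit (limit p : Int) (spf : List Int) (hp : 2 ≤ p) (hpl : ¬ (p * p ≤ limit))
    (hInv : SpfInv limit p spf) : SpfGood limit spf := by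
  obtain ⟨hlen, hget⟩ := hInv
  refine ⟨hlen, ?_⟩
  intro m hm
  rw [hget m hm]
  by_cases hm2 : 2 ≤ m
  · by_cases hfac : m.minFac = m
    · rw [if_pos hm2]
      split
      · rfl
      · exact_mod_cast hfac.symm
    · have hmlim : (m:Int) ≤ limit := by rw [hlen] at hm; omega
      have hcomp : ¬ m.Prime := by
        rw [Nat.prime_def_minFac]; tauto
      have hsq : m.minFac ^ 2 ≤ m := Nat.minFac_sq_le_self (by omega) hcomp
      have hpf : (m.minFac : Int) < p := by
        nlinarith [hsq, hmlim, hpl, (by exact_mod_cast hsq : ((m.minFac : Int))^2 ≤ (m:Int)),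
          (by positivity : (0:Int) ≤ (m.minFac : Int))]
      rw [if_pos ⟨hm2, hpf, hfac⟩, if_pos hm2]
  · rw [if_neg (by tauto), if_neg hm2]

theorem spf_run (limit : Int) : ∀ (N : Nat) (p : Int) (spf : List Int),
    (limit + 2 - p).toNat ≤ N → 2 ≤ p → SpfInv limit p spf →
    SpfGood limit (spfSieve limit p spf) := by
  intro N
  induction N with
  | zero =>
    intro p spf hN hp hInv
    have hple : limit + 2 ≤ p := by omega
    have hgt : ¬ (p * p ≤ limit) := by nlinarith
    rw [spfSieve, dif_neg hgt]
    exact spf_exit limit p spf hp hgt hInv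
  | succ n ih =>
    intro p spf hN hp hInv
    rw [spfSieve]
    split
    case isTrue h =>
      exact ih (p+1) _ (by omega) (by omega) (spf_step limit p spf hp h hInv)
    case isFalse h =>
      exact spf_exit limit p spf hp h hInv

theorem spf_good (limit : Int) : SpfGood limit (spfSieve limit 2 (PySem.List.pyRange 0 (limit + 1) 1)) :=
  spf_run limit (limit + 2 - 2).toNat 2 _ le_rfl (by omega) (spf_init limit)

theorem divOut_spec (q : Int) (hq : 2 ≤ q) : ∀ (N : Nat) (n : Int), n.toNat ≤ N → 1 ≤ n →
    1 ≤ (divOut q n).2 ∧ 0 ≤ (divOut q n).1 ∧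
      q ^ ((divOut q n).1).toNat * (divOut q n).2 = n ∧ ¬ q ∣ (divOut q n).2 := by
  intro N
  induction N with
  | zero => intro n hN h1; omega
  | succ k ih =>
    intro n hN h1
    rw [divOut]
    by_cases hd : PySem.Int.mod n q = 0
    · rw [dif_pos ⟨hq, h1, hd⟩]
      have hdvd : q ∣ n := (PySem.Int.mod_eq_zero_iff_dvd n q).mp hd
      have hqn : q ≤ n := Int.le_of_dvd (by omega) hdvd
      obtain ⟨c, rfl⟩ := hdvd
      have hc1 : 1 ≤ c := by nlinarith
      have harg : PySem.Int.floordiv (q * c) q = c := by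
        rw [PySem.Int.floordiv_eq_ediv_of_pos (by omega)]
        exact Int.mul_ediv_cancel_left c (by omega)
      rw [harg]
      have hclt : c < q * c := by nlinarith
      obtain ⟨r1, r0, rmul, rnd⟩ := ih c (by omega) hc1
      show 1 ≤ (divOut q c).2 ∧ 0 ≤ (divOut q c).1 + 1 ∧
        q ^ ((divOut q c).1 + 1).toNat * (divOut q c).2 = q * c ∧ ¬ q ∣ (divOut q c).2
      refine ⟨r1, by omega, ?_, rnd⟩
      have htn : ((divOut q c).1 + 1).toNat = ((divOut q c).1).toNat + 1 := by omega
      rw [htn, pow_succ]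
      calc q ^ ((divOut q c).1).toNat * q * (divOut q c).2
          = q * (q ^ ((divOut q c).1).toNat * (divOut q c).2) := by ring
        _ = q * c := by rw [rmul]
    · rw [dif_neg (fun h => hd h.2.2)]
      exact ⟨h1, le_refl 0, by simp, fun h => hd ((PySem.Int.mod_eq_zero_iff_dvd n q).mpr h)⟩

theorem dLoop_run (limit : Int) (spf : List Int) (hG : SpfGood limit spf) :
    ∀ (N : Nat) (n : Int), n.toNat ≤ N → 1 ≤ n → n ≤ limit → ∀ d : Int,
      dLoop spf n d = d * (n.toNat.divisors.card : Int) := by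
  obtain ⟨hlen, hget⟩ := hG
  intro N
  induction N with
  | zero => intro n hN h1; omega
  | succ k ih =>
    intro n hN h1 hlim d
    rw [dLoop]
    by_cases hn1 : 1 < n
    case neg =>
      rw [dif_neg hn1]
      have : n = 1 := by omega
      subst this
      simp
    case pos =>
      rw [dif_pos hn1]
      have hnlt : n.toNat < spf.length := by rw [hlen]; omega
      have hcast : n = ((n.toNat : Nat) : Int) := by omega
      have hq : PySem.List.pyGetD spf n 0 = ((n.toNat.minFac : Nat) : Int) := by
        conv_lhs => rw [hcast]
        rw [PySem.List.pyGetD_natCast, hget n.toNat hnlt, if_pos (by omega)]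
      have hprime : n.toNat.minFac.Prime := Nat.minFac_prime (by omega)
      have hq2 : 2 ≤ ((n.toNat.minFac : Nat) : Int) := by exact_mod_cast hprime.two_le
      have hspec := divOut_spec ((n.toNat.minFac : Nat) : Int) hq2 n.toNat n le_rfl (by omega)
      obtain ⟨r1, r0, rmul, rnd⟩ := hspec
      rw [hq]
      rcases hdo : divOut ((n.toNat.minFac : Nat) : Int) n with ⟨e, n'⟩
      rw [hdo] at r1 r0 rmul rnd
      simp only at r1 r0 rmul rnd ⊢
      obtain ⟨v, rfl⟩ : ∃ v : Nat, n' = (v : Int) := ⟨n'.toNat, by omega⟩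
      have hdvdn : ((n.toNat.minFac : Nat) : Int) ∣ n := by
        conv_rhs => rw [hcast]
        exact_mod_cast Nat.minFac_dvd n.toNat
      have he1 : 1 ≤ e.toNat := by
        rcases Nat.eq_zero_or_pos e.toNat with h0 | h
        · exfalso
          rw [h0, pow_zero, one_mul] at rmul
          exact rnd (rmul ▸ hdvdn)
        · omega
      have hpow2 : (2:Int) ≤ ((n.toNat.minFac : Nat) : Int) ^ e.toNat := by
        calc (2:Int) ≤ ((n.toNat.minFac : Nat) : Int) := hq2
          _ ≤ _ := le_self_pow₀ (by omega) (by omega)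
      have hlt : (v:Int) < n := by nlinarith
      rw [dif_pos ⟨by omega, hlt⟩]
      rw [ih (v:Int) (by omega) (by omega) (by omega) _]
      have hNmul : n.toNat = n.toNat.minFac ^ e.toNat * v := by
        have hh : ((n.toNat.minFac ^ e.toNat * v : Nat) : Int) = n := by push_cast; exact rmul
        omega
      have hnd : ¬ n.toNat.minFac ∣ v := fun h => rnd (by exact_mod_cast h)
      have hcop : (n.toNat.minFac ^ e.toNat).Coprime v :=
        Nat.Coprime.pow_left _ ((Nat.Prime.coprime_iff_not_dvd hprime).mpr hnd)
      have hcard : n.toNat.divisors.card = (e.toNat + 1) * v.divisors.card := by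
        rw [hNmul, Nat.Coprime.card_divisors_mul hcop]
        congr 1
        simp [Nat.divisors_prime_pow hprime]
      rw [Int.toNat_natCast, hcard]
      have hecast : ((e.toNat : Nat) : Int) = e := by omega
      push_cast
      rw [hecast]
      ring

theorem countP_range_filter (N : Nat) (p : Nat → Bool) :
    ((Finset.range N).filter (fun k => p k = true)).card = (List.range N).countP p := by
  induction N with
  | zero => simp
  | succ n ih =>
    rw [Finset.range_add_one, List.range_succ, Finset.filter_insert, List.countP_append]
    by_cases h : p n
    · rw [if_pos (by simp [h]), Finset.card_insert_of_notMem (by simp)]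
      simp [ih, h]
    · rw [if_neg (by simp [h])]
      simp [ih, h]

theorem divisors_card_eq (N : Nat) :
    N.divisors.card = (List.range N).countP (fun k => (1+k) ∣ N) := by
  rw [Nat.divisors]
  rw [show Finset.Ico 1 (N+1) = Finset.map (addLeftEmbedding 1) (Finset.range N) by
    rw [Finset.range_eq_Ico, Finset.map_add_left_Ico]; congr 1; omega]
  rw [Finset.filter_map, Finset.card_map]
  rw [← countP_range_filter]
  congr 1
  ext k
  simp [addLeftEmbedding]

theorem cnt_full (N : Nat) : cntTo ((N:Nat):Int) ((N:Nat):Int) = (N.divisors.card : Int) := by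
  unfold cntTo
  rw [PySem.List.pyRange_one]
  rw [show ((N:Int)+1-1).toNat = N by omega, List.countP_map]
  rw [divisors_card_eq]
  congr 1
  apply List.countP_congr
  intro k hk
  have hkN : k < N := List.mem_range.mp hk
  simp only [Function.comp]
  constructor
  · intro h
    simp only [decide_eq_true_eq] at h ⊢
    exact_mod_cast h.1
  · intro h
    simp only [decide_eq_true_eq] at h ⊢
    refine ⟨by exact_mod_cast h, by omega⟩

theorem mem_inner (i limit : Int) (hi : 1 ≤ i) (m : Nat) :
    ((m:Int) ∈ PySem.List.pyRange i (limit+1) i) ↔ (i ≤ (m:Int) ∧ (m:Int) ≤ limit ∧ i ∣ (m:Int)) := by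
  rw [PySem.List.mem_pyRange_iff_of_pos (by omega)]
  constructor
  · rintro ⟨h1, h2, h3⟩
    exact ⟨h1, by omega, (dvd_sub_left (dvd_refl i)).mp h3⟩
  · rintro ⟨h1, h2, h3⟩
    exact ⟨h1, by omega, (dvd_sub_left (dvd_refl i)).mpr h3⟩

theorem arrF_length (limit j : Int) : (arrF limit j).length = (limit+1).toNat := by
  simp [arrF]

theorem getD_lt {l : List Int} {m : Nat} (h : m < l.length) : l.getD m 0 = l[m] := by
  rw [List.getD_eq_getElem?_getD, List.getElem?_eq_getElem h]
  rfl

theorem arrF_getD (limit j : Int) (m : Nat) (hm : m < (limit+1).toNat) :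
    (arrF limit j).getD m 0 = cntTo j (m:Int) := by
  rw [List.getD_eq_getElem?_getD]
  have h : (arrF limit j)[m]? = some (cntTo j (m:Int)) := by
    unfold arrF
    rw [List.getElem?_map, List.getElem?_range (show m < (limit+1).toNat by omega)]
    rfl
  rw [h]
  rfl

theorem cnt_succ (k m : Int) (hk : 0 ≤ k) :
    cntTo (k+1) m = cntTo k m + (if (k+1 ∣ m ∧ k+1 ≤ m) then 1 else 0) := by
  unfold cntTo
  rw [PySem.List.pyRange_one_succ_right (by omega : (1:Int) ≤ k+1), List.countP_append]
  by_cases h : (k+1 ∣ m ∧ k+1 ≤ m)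
  · rw [if_pos h]
    simp [h.1, h.2]
  · rw [if_neg h]
    have : ¬ (k+1 ∣ m ∧ k+1 ≤ m) := h
    simp only [List.countP_cons, List.countP_nil]
    by_cases h1 : k+1 ∣ m <;> by_cases h2 : k+1 ≤ m <;> (simp [h1, h2]; try tauto)

theorem arrF_zero (limit : Int) : arrF limit 0 = List.replicate (limit+1).toNat 0 := by
  unfold arrF cntTo
  rw [PySem.List.pyRange_one_eq_nil (by omega)]
  simp [List.map_const']

theorem inner_step (limit : Int) (k : Nat) (hk : (k:Int) + 1 ≤ limit) :
    workingInner limit ((k:Int)+1) (arrF limit (k:Int)) = arrF limit ((k:Int)+1) := by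
  have hpos : (0:Int) < (k:Int)+1 := by omega
  have hL : ∀ x ∈ PySem.List.pyRange ((k:Int)+1) (limit+1) ((k:Int)+1),
      0 ≤ x ∧ x.toNat < (arrF limit (k:Int)).length := by
    intro x hx
    rw [PySem.List.mem_pyRange_iff_of_pos hpos] at hx
    refine ⟨by omega, ?_⟩
    rw [arrF_length]; omega
  obtain ⟨hilen, higet⟩ := incr_fold _ (nodup_pyRange_pos _ _ _ hpos) (arrF limit (k:Int)) hL
  apply List.ext_getElem
  · exact hilen.trans (by rw [arrF_length, arrF_length])
  · intro m h1 h2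
    have hm : m < (limit+1).toNat := by rw [arrF_length] at h2; exact h2
    have hig : (workingInner limit ((k:Int)+1) (arrF limit (k:Int))).getD m 0
        = (arrF limit (k:Int)).getD m 0
          + (if ((m:Int) ∈ PySem.List.pyRange ((k:Int)+1) (limit+1) ((k:Int)+1)) then 1 else 0) :=
      higet m (by rw [arrF_length]; omega)
    have hgoal : (workingInner limit ((k:Int)+1) (arrF limit (k:Int))).getD m 0
        = (arrF limit ((k:Int)+1)).getD m 0 := by
      rw [hig]
      rw [arrF_getD _ _ _ hm, arrF_getD _ _ _ hm]
      rw [cnt_succ _ _ (by omega)]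
      have hiff := mem_inner ((k:Int)+1) limit (by omega) m
      by_cases hmem : ((m:Int) ∈ PySem.List.pyRange ((k:Int)+1) (limit+1) ((k:Int)+1))
      · obtain ⟨ha, hb, hc⟩ := hiff.mp hmem
        rw [if_pos hmem, if_pos ⟨hc, ha⟩]
      · rw [if_neg hmem, if_neg (fun h => hmem (hiff.mpr ⟨h.2, by omega, h.1⟩))]
    calc (workingInner limit ((k:Int)+1) (arrF limit (k:Int)))[m]
        = (workingInner limit ((k:Int)+1) (arrF limit (k:Int))).getD m 0 := (getD_lt h1).symm
      _ = (arrF limit ((k:Int)+1)).getD m 0 := hgoal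
      _ = (arrF limit ((k:Int)+1))[m] := getD_lt h2

theorem step_eq (limit : Int) (k : Nat) (hk : (k:Int) + 1 ≤ limit) (X Y : Int) :
    workingStep limit (arrF limit (k:Int), X, Y) ((k:Int)+1)
      = (arrF limit ((k:Int)+1), (if dRef ((k:Int)+1) = Y then X + 1 else X), dRef ((k:Int)+1)) := by
  have hcast : (k:Int)+1 = (((k+1 : Nat)):Int) := by push_cast; ring
  have hcurr : PySem.List.pyGetD (arrF limit ((k:Int)+1)) ((k:Int)+1) 0 = dRef ((k:Int)+1) := by
    rw [hcast, PySem.List.pyGetD_natCast, arrF_getD _ _ _ (by omega), cnt_full (k+1)]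
    unfold dRef
    rw [show (((k+1:Nat)):Int).toNat = k+1 by omega]
  unfold workingStep
  simp only [inner_step limit k hk, hcurr]

theorem A_fold (limit : Int) : ∀ (k : Nat), (k:Int) ≤ limit →
    (PySem.List.pyRange 1 ((k:Int)+1) 1).foldl (workingStep limit) (List.replicate (limit+1).toNat 0, 0, 0)
      = (arrF limit (k:Int),
         ((PySem.List.pyRange 1 ((k:Int)+1) 1).foldl refStep (0, 0)).1,
         ((PySem.List.pyRange 1 ((k:Int)+1) 1).foldl refStep (0, 0)).2) := by
  intro k
  induction k with
  | zero =>
    intro _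
    rw [show (((0:Nat)):Int)+1 = 1 by norm_num, PySem.List.pyRange_one_eq_nil (by omega)]
    simp [arrF_zero]
  | succ k ih =>
    intro hk1
    have hk1' : (k:Int) + 1 ≤ limit := by push_cast at hk1; omega
    have hk : (k:Int) ≤ limit := by omega
    have hcast : (((k+1 : Nat)):Int) = (k:Int)+1 := by push_cast; ring
    rw [hcast]
    rw [PySem.List.pyRange_one_succ_right (by omega : (1:Int) ≤ (k:Int)+1)]
    rw [List.foldl_append, List.foldl_append, ih hk]
    simp only [List.foldl_cons, List.foldl_nil]
    rw [step_eq limit k hk1']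
    rfl

-- ===== VERDICT (by name: the statement is the Claim_ definition above) =====
theorem working_spec : Claim_equal_working := by
  intro limit _
  unfold Spec_working
  by_cases hneg : limit < 0
  · unfold working working_alt
    rw [PySem.List.pyRange_one_eq_nil (by omega)]
    rfl
  · obtain ⟨K, rfl⟩ : ∃ K : Nat, limit = (K:Int) := ⟨limit.toNat, by omega⟩
    have hA : working (K:Int)
        = ((PySem.List.pyRange 1 ((K:Int)+1) 1).foldl refStep (0, 0)).1 := by
      show (((PySem.List.pyRange 1 ((K:Int)+1) 1).foldl (workingStep (K:Int))
        (List.replicate ((K:Int)+1).toNat 0, 0, 0)).2).1 = _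
      rw [A_fold (K:Int) K le_rfl]
    rw [hA]
    unfold working_alt
    have hgood := spf_good (K:Int)
    have hcong : (PySem.List.pyRange 1 ((K:Int)+1) 1).foldl
        (fun st i => ((if dLoop (spfSieve (K:Int) 2 (PySem.List.pyRange 0 ((K:Int)+1) 1)) i 1 = st.2
                        then st.1 + 1 else st.1), dLoop (spfSieve (K:Int) 2 (PySem.List.pyRange 0 ((K:Int)+1) 1)) i 1)) (0, 0)
        = (PySem.List.pyRange 1 ((K:Int)+1) 1).foldl refStep (0, 0) := by
      apply PySem.List.foldl_congr_mem
      intro acc x hx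
      rw [PySem.List.mem_pyRange_one] at hx
      have hd : dLoop (spfSieve (K:Int) 2 (PySem.List.pyRange 0 ((K:Int)+1) 1)) x 1
          = 1 * ((x.toNat.divisors.card : Nat) : Int) :=
        dLoop_run (K:Int) _ hgood x.toNat x le_rfl (by omega) (by omega) 1
      rw [one_mul] at hd
      simp [refStep, dRef, hd]
    rw [← hcong]
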